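-- pv_equiv track=rewrite | github.com/TabulateJarl8/ti842py | ti842py/tiParser.py | closeOpen
-- ===== SOURCE A (Python) =====
-- def closeOpen(string):
-- 	if string.count("\"") % 2 != 0:
-- 		string = string + "\""
--
-- 	# Split string by "
-- 	splitString = string.split('"')
-- 	open = 0
-- 	closed = 0
--
-- 	for i in range(0, len(splitString), 2): # skip all even elements since those are in between quotes
-- 		open += splitString[i].count('(')
-- 		closed += splitString[i].count(')')
--
-- 	# Add needed closing parentheses
-- 	string = string + ')' * (open - closed)
-- 	return string
-- ===== SOURCE B (Python) =====
-- def closeOpen(string):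
-- 	inside = False
-- 	quotes = 0
-- 	open_ = 0
-- 	closed = 0
-- 	for ch in string:
-- 		if ch == '"':
-- 			inside = not inside
-- 			quotes += 1
-- 		elif not inside:
-- 			if ch == '(':
-- 				open_ += 1
-- 			elif ch == ')':
-- 				closed += 1
-- 	if quotes % 2 == 1:
-- 		string = string + '"'
-- 	return string + ')' * (open_ - closed)
-- ===== Notes on version B (the rewrite author's own statement) =====
-- stated objective: simpler
-- what changed: Replaces A's split-by-quote plus even-index-segment counting loop with a single character-by-character pass keeping an inside-quotes flag, a quote counter and open/closed paren counters.
import Mathlib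
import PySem

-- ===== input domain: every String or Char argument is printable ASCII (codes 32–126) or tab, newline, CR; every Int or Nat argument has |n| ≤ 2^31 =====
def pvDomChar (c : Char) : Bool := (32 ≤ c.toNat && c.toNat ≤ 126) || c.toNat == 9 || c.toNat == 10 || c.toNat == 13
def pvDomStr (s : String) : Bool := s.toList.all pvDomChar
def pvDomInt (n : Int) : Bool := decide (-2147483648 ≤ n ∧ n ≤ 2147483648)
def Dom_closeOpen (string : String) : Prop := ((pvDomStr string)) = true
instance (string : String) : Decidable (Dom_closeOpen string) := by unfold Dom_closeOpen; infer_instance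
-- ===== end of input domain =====

-- B is SIMPLER: one stateful character pass (inside-quotes flag + three counters) replacing
-- A's split-by-quote and even-index-segment counting loop.

-- ===== PORT A =====
-- the body of A's 'for i in range(0, len(splitString), 2)' loop ('open'/'closed' as a pair)
def aStep (splitString : List String) (oc : Int × Int) (i : Int) : Int × Int :=
  (oc.1 + (PySem.Str.count (PySem.List.pyGetD splitString i "") "(" : Int),
   oc.2 + (PySem.Str.count (PySem.List.pyGetD splitString i "") ")" : Int))

def closeOpen (string : String) : String :=
  let string := if PySem.Str.count string "\"" % 2 ≠ 0
                then String.ofList (string.toList ++ "\"".toList) else string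
  let splitString := (PySem.Str.split? string "\"").getD []
  let oc := (PySem.List.pyRange 0 (splitString.length : Int) 2).foldl (aStep splitString) (0, 0)
  String.ofList (string.toList ++ List.replicate (oc.1 - oc.2).toNat ')')

-- ===== PORT B =====
-- the body of B's 'for ch in string' loop; state = (inside, quotes, open_, closed)
def bStep (st : Bool × Int × Int × Int) (ch : Char) : Bool × Int × Int × Int :=
  if ch = '"' then (!st.1, st.2.1 + 1, st.2.2.1, st.2.2.2)
  else if !st.1 then
    (if ch = '(' then (st.1, st.2.1, st.2.2.1 + 1, st.2.2.2)
     else if ch = ')' then (st.1, st.2.1, st.2.2.1, st.2.2.2 + 1)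
     else st)
  else st

def closeOpen_alt (string : String) : String :=
  let st := string.toList.foldl bStep (false, 0, 0, 0)
  let string := if st.2.1 % 2 = 1 then String.ofList (string.toList ++ "\"".toList) else string
  String.ofList (string.toList ++ List.replicate (st.2.2.1 - st.2.2.2).toNat ')')

-- ===== PRECONDITION & SPEC =====
def Spec_closeOpen (string : String) (out : String) : Prop := out = closeOpen_alt string
instance (string : String) (out : String) : Decidable (Spec_closeOpen string out) := by unfold Spec_closeOpen; infer_instance

-- ===== CLAIM (what is proved, stated in full; the proofs are below) =====
def Claim_equal_closeOpen : Prop := ∀ (string : String), Dom_closeOpen string → Spec_closeOpen string (closeOpen string)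

-- ===== LEMMAS AND PROOFS =====

-- alternating segment sum: total count of t in the segments at even positions (b = true: count
-- the head segment)
def esum (b : Bool) (L : List (List Char)) (t : Char) : Nat :=
  match L with
  | [] => 0
  | x :: r => (if b then x.count t else 0) + esum (!b) r t

-- PySem.Chars.count with a single-character needle is List.count
theorem countGo_char (cs : List Char) : ∀ (fuel acc : Nat) (ch : Char), cs.length ≤ fuel →
    PySem.Chars.count.go [ch] fuel cs acc = acc + cs.count ch := by
  induction cs with
  | nil => intro fuel acc ch _; cases fuel <;> simp [PySem.Chars.count.go]
  | cons c rest ih =>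
    intro fuel acc ch h
    cases fuel with
    | zero => simp at h
    | succ f =>
      simp only [PySem.Chars.count.go, List.isPrefixOf, List.count_cons]
      by_cases hc : ch = c
      · subst hc
        simp only [BEq.rfl, Bool.true_and, List.isPrefixOf_nil_left, if_true,
          List.length_cons, List.length_nil, List.drop_succ_cons, List.drop_zero]
        rw [ih f (acc + 1) ch (by simp at h; omega)]
        omega
      · have : (ch == c) = false := by simp [hc]
        simp only [this, Bool.false_and, if_false]
        rw [ih f acc ch (by simpa using h)]
        simp [show (c == ch) = false by simp [Ne.symm hc]]

theorem count_char (cs : List Char) (ch : Char) :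
    PySem.Chars.count cs [ch] = cs.count ch := by
  have := countGo_char cs cs.length 0 ch (le_refl _)
  simpa [PySem.Chars.count] using this

theorem splitOn_ne_nil (cs : List Char) (ch : Char) : cs.splitOn ch ≠ [] := by
  simp [List.splitOn, List.splitOnP_ne_nil]

-- PySem.Chars.splitOn with a single-character separator is Mathlib's List.splitOn
theorem splitGo_char (cs : List Char) : ∀ (fuel : Nat) (cur : List Char)
    (acc : List (List Char)) (ch : Char), cs.length < fuel →
    PySem.Chars.splitOn.go [ch] fuel cs cur acc
      = acc.reverse ++ (cs.splitOn ch).modifyHead (cur.reverse ++ ·) := by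
  induction cs with
  | nil =>
    intro fuel cur acc ch h
    cases fuel with
    | zero => omega
    | succ f => simp [PySem.Chars.splitOn.go, List.splitOn]
  | cons c rest ih =>
    intro fuel cur acc ch h
    cases fuel with
    | zero => omega
    | succ f =>
      simp only [PySem.Chars.splitOn.go, List.isPrefixOf, List.isPrefixOf_nil_left,
        Bool.and_true]
      have hf : rest.length < f := by simp at h; omega
      by_cases hc : ch = c
      · subst hc
        simp only [BEq.rfl, if_true, List.length_cons, List.length_nil,
          List.drop_succ_cons, List.drop_zero]
        rw [ih f [] (cur.reverse :: acc) ch hf]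
        have hs : (ch :: rest).splitOn ch = [] :: rest.splitOn ch := by
          simp [List.splitOn, List.splitOnP_cons]
        rw [hs]
        cases hsp : rest.splitOn ch with
        | nil => exact absurd hsp (splitOn_ne_nil rest ch)
        | cons z zs => simp
      · have hbe : (ch == c) = false := by simp [hc]
        simp only [hbe, Bool.false_and, if_false]
        rw [ih f (c :: cur) acc ch hf]
        have hs : (c :: rest).splitOn ch = (rest.splitOn ch).modifyHead (c :: ·) := by
          simp [List.splitOn, List.splitOnP_cons, show (c == ch) = false by simp [Ne.symm hc]]
        rw [hs]
        cases hsp : rest.splitOn ch with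
        | nil => exact absurd hsp (splitOn_ne_nil rest ch)
        | cons z zs => simp

theorem split_char (cs : List Char) (ch : Char) :
    PySem.Chars.splitOn cs [ch] = cs.splitOn ch := by
  have h := splitGo_char cs (cs.length + 1) [] [] ch (by omega)
  unfold PySem.Chars.splitOn
  rw [h]
  cases hsp : cs.splitOn ch with
  | nil => exact absurd hsp (splitOn_ne_nil cs ch)
  | cons z zs => simp

theorem esum_modifyHead (b : Bool) (L : List (List Char)) (hL : L ≠ []) (c t : Char) :
    esum b (L.modifyHead (c :: ·)) t
      = (if b then (if c = t then 1 else 0) else 0) + esum b L t := by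
  cases L with
  | nil => exact absurd rfl hL
  | cons x r =>
    simp [esum, List.count_cons]
    by_cases hb : b <;> by_cases hct : c = t <;>
      simp [hb, hct, show ∀ h : c = t, (c == t) = true from fun h => by simp [h]] <;> omega

theorem esum_append_nil (b : Bool) (L : List (List Char)) (t : Char) :
    esum b (L ++ [[]]) t = esum b L t := by
  induction L generalizing b with
  | nil => simp [esum]
  | cons x r ih => simp [esum, ih]

theorem splitOn_append_self (cs : List Char) (ch : Char) :
    (cs ++ [ch]).splitOn ch = cs.splitOn ch ++ [[]] := by
  induction cs with
  | nil => simp [List.splitOn, List.splitOnP_cons, List.splitOnP_nil]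
  | cons c rest ih =>
    by_cases hc : c = ch
    · subst hc
      simp [List.splitOn, List.splitOnP_cons] at ih ⊢
      simp [ih]
    · have hbe : (c == ch) = false := by simp [hc]
      simp only [List.cons_append, List.splitOn, List.splitOnP_cons, hbe, if_false] at ih ⊢
      rw [ih]
      cases h : List.splitOnP (· == ch) rest with
      | nil => exact absurd h (List.splitOnP_ne_nil _ _)
      | cons y ys => simp

-- B's single pass computes: the quote count, and the paren counts over the even-position
-- split segments
theorem foldB (cs : List Char) : ∀ (b : Bool) (q o c : Int),
    cs.foldl bStep (b, q, o, c)
      = (xor b (decide (cs.count '"' % 2 = 1)),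
         q + cs.count '"',
         o + esum (!b) (cs.splitOn '"') '(',
         c + esum (!b) (cs.splitOn '"') ')') := by
  induction cs with
  | nil => intro b q o c; simp [esum, List.splitOn, List.splitOnP_nil]
  | cons c0 rest ih =>
    intro b q o c
    by_cases hq : c0 = '"'
    · subst hq
      simp only [List.foldl_cons, bStep, if_true, List.count_cons, BEq.rfl]
      rw [ih]
      have hs : ('"' :: rest).splitOn '"' = [] :: rest.splitOn '"' := by
        simp [List.splitOn, List.splitOnP_cons]
      rw [hs]
      have hpar : ((rest.count '"' + 1) % 2 = 1) ↔ ¬(rest.count '"' % 2 = 1) := by omega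
      refine Prod.ext ?_ (Prod.ext ?_ (Prod.ext ?_ ?_))
      · rcases Nat.mod_two_eq_zero_or_one (rest.count '"') with h2 | h2 <;>
          cases b <;> simp [hpar, h2]
      · push_cast; ring
      · simp [esum, Bool.not_not]
      · simp [esum, Bool.not_not]
    · have hbe : (c0 == '"') = false := by simp [hq]
      have hs : (c0 :: rest).splitOn '"' = (rest.splitOn '"').modifyHead (c0 :: ·) := by
        simp [List.splitOn, List.splitOnP_cons, hbe]
      have hnn := splitOn_ne_nil rest '"'
      have hcnt : (c0 :: rest).count '"' = rest.count '"' := by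
        simp [List.count_cons, hbe]
      simp only [List.foldl_cons, bStep, if_neg hq]
      rw [hcnt, hs]
      by_cases hb : b
      · subst hb
        simp only [Bool.not_true, Bool.false_eq_true, if_false]
        rw [ih]
        rw [esum_modifyHead false _ hnn c0 '(', esum_modifyHead false _ hnn c0 ')']
        simp
      · have hb' : b = false := by simpa using hb
        subst hb'
        simp only [Bool.not_false, if_true]
        rw [esum_modifyHead true _ hnn c0 '(', esum_modifyHead true _ hnn c0 ')']
        by_cases ho : c0 = '('
        · subst ho
          simp only [if_pos rfl]
          rw [ih]
          norm_num
          ring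
        · simp only [if_neg ho]
          by_cases hc2 : c0 = ')'
          · subst hc2
            simp only [if_pos rfl]
            rw [ih]
            simp [if_neg (by decide : ¬ (')' : Char) = '(')]
            ring
          · simp only [if_neg hc2]
            rw [ih]
            simp [if_neg ho, if_neg hc2]

-- A's even-index loop over range(0, len, 2) is the alternating segment sum
theorem pyRange02 (n : Nat) :
    PySem.List.pyRange 0 (n : Int) 2 = List.map (fun k : Nat => 2 * (k : Int)) (List.range ((n + 1) / 2)) := by
  rw [PySem.List.pyRange_of_pos 0 (n : Int) (by norm_num)]
  have hcnt : (if (0 : Int) < (n : Int) then (((n : Int) - 0 + 2 - 1) / 2).toNat else 0)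
      = (n + 1) / 2 := by
    split <;> omega
  rw [hcnt]
  refine List.map_congr_left ?_
  intro k _
  omega

theorem aloop (L : List (List Char)) : ∀ (o c : Int),
    (List.range ((L.length + 1) / 2)).foldl
        (fun (oc : Int × Int) k =>
          (oc.1 + ((L.getD (2 * k) []).count '(' : Int),
           oc.2 + ((L.getD (2 * k) []).count ')' : Int))) (o, c)
      = (o + esum true L '(', c + esum true L ')') := by
  match L with
  | [] => intro o c; simp [esum]
  | [x] => intro o c; simp [esum]
  | x :: y :: R =>
    intro o c
    have hlen : ((x :: y :: R).length + 1) / 2 = (R.length + 1) / 2 + 1 := by simp; omega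
    rw [hlen, List.range_succ_eq_map, List.foldl_cons, List.foldl_map]
    have hidx : ∀ (k : Nat), (x :: y :: R).getD (2 * Nat.succ k) [] = R.getD (2 * k) [] := by
      intro k
      have h2 : 2 * Nat.succ k = 2 * k + 1 + 1 := by omega
      rw [h2, List.getD_cons_succ, List.getD_cons_succ]
    simp only [Nat.mul_zero, List.getD_cons_zero, hidx]
    rw [aloop R]
    simp only [esum, Bool.not_true, Bool.not_false, if_true, if_false]
    refine Prod.ext ?_ ?_ <;> push_cast <;> ring

-- A's whole paren-counting loop, on a split list of segments
theorem loopA (L : List (List Char)) :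
    (PySem.List.pyRange 0 ((L.map String.ofList).length : Int) 2).foldl
        (aStep (L.map String.ofList)) (0, 0)
      = ((esum true L '(' : Int), (esum true L ')' : Int)) := by
  rw [List.length_map, pyRange02, List.foldl_map]
  have hstep : (fun (oc : Int × Int) (k : Nat) => aStep (L.map String.ofList) oc (2 * (k : Int)))
      = (fun (oc : Int × Int) k =>
          (oc.1 + ((L.getD (2 * k) []).count '(' : Int),
           oc.2 + ((L.getD (2 * k) []).count ')' : Int))) := by
    funext oc k
    have hcast : (2 * (k : Int)) = ((2 * k : Nat) : Int) := by push_cast; ring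
    have hget : PySem.List.pyGetD (L.map String.ofList) (2 * (k : Int)) ""
        = String.ofList (L.getD (2 * k) []) := by
      rw [show ("" : String) = String.ofList [] from rfl,
        PySem.List.pyGetD_map String.ofList L _ [], hcast, PySem.List.pyGetD_natCast]
    simp [aStep, hget, PySem.Str.count_eq, count_char]
  rw [hstep, aloop L 0 0]
  simp

theorem split_getD (t : String) : (PySem.Str.split? t "\"").getD []
    = (t.toList.splitOn '"').map String.ofList := by
  simp only [PySem.Str.split?, PySem.Chars.split?,
    show ("\"" : String).toList = ['"'] from rfl]
  simp [split_char]

theorem count_str (t : String) : PySem.Str.count t "\"" = t.toList.count '"' := by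
  rw [PySem.Str.count_eq, show ("\"" : String).toList = ['"'] from rfl, count_char]

theorem closeOpen_eq_alt (s : String) : closeOpen s = closeOpen_alt s := by
  by_cases hpar : (s.toList.count '"') % 2 = 1
  · have hA : ¬ PySem.Str.count s "\"" % 2 = 0 := by rw [count_str]; omega
    have hB : ((0 : Int) + (s.toList.count '"' : Int)) % 2 = 1 := by omega
    simp only [closeOpen, closeOpen_alt, foldB, if_pos hA, if_pos hB,
      show ("\"" : String).toList = ['"'] from rfl, String.toList_ofList]
    rw [split_getD]
    simp only [String.toList_ofList, splitOn_append_self, loopA]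
    simp [esum_append_nil]
  · have hA : ¬ ¬ PySem.Str.count s "\"" % 2 = 0 := by rw [count_str]; omega
    have hB : ¬ ((0 : Int) + (s.toList.count '"' : Int)) % 2 = 1 := by omega
    simp only [closeOpen, closeOpen_alt, foldB, if_neg hA, if_neg hB]
    rw [split_getD]
    simp only [loopA]
    simp

-- ===== VERDICT (by name: the statement is the Claim_ definition above) =====
theorem closeOpen_spec : Claim_equal_closeOpen := by
  intro s _
  unfold Spec_closeOpen
  exact closeOpen_eq_alt s
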